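-- pv_equiv track=rewrite | github.com/bryceandress/advent-of-code-2023 | day9/puzzle_2/solve.py | solve
-- ===== SOURCE A (Python) =====
-- def solve(big_answers):
--     z = 0
--     first = None
--     isFirst = True
--     for i in reversed(big_answers):
--         if isFirst:
--             z = int(i[0])
--             isFirst  = False
--         else:
--             z = int(i[0]) - first
--         first = z
--     return z
-- ===== SOURCE B (Python) =====
-- def solve(big_answers):
--     total = 0
--     sign = 1
--     for row in big_answers:
--         total += sign * int(row[0])
--         sign = -sign
--     return total
-- ===== Notes on version B (the rewrite author's own statement) =====
-- stated objective: simpler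
-- what changed: Replaces the reversed stateful running-subtraction fold (z/first/isFirst) with a single forward pass accumulating a signed sum (sign flips each row), exploiting that the subtraction fold telescopes into an alternating sum.
import Mathlib
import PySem

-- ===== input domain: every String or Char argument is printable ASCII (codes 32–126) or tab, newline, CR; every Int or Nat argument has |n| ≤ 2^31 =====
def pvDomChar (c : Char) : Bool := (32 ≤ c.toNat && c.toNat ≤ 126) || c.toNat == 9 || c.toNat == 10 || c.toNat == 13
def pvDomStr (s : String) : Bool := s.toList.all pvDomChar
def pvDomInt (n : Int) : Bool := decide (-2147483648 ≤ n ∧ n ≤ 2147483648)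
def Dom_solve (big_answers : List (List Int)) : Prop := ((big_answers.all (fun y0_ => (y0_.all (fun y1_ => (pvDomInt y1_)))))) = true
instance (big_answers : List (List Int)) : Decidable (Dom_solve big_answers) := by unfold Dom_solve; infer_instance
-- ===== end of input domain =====

-- B replaces A's reversed running-subtraction fold by a forward signed-sum pass (simpler decomposition, same cost).


-- ===== PORT A =====
-- state (z, first, isFirst); i[0] ported as (pyGet? i 0).getD 0 — the none case (empty row,
-- IndexError in Python) is excluded by Pre_solve
def solveStep (s : Int × Option Int × Bool) (i : List Int) : Int × Option Int × Bool :=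
  if s.2.2 then
    let z := (PySem.List.pyGet? i 0).getD 0
    (z, some z, false)
  else
    let z := (PySem.List.pyGet? i 0).getD 0 - s.2.1.getD 0
    (z, some z, s.2.2)

def solve (big_answers : List (List Int)) : Int :=
  (big_answers.reverse.foldl solveStep (0, none, true)).1

-- ===== PORT B =====
def solve_alt (big_answers : List (List Int)) : Int :=
  (big_answers.foldl
    (fun (s : Int × Int) row => (s.1 + s.2 * (PySem.List.pyGet? row 0).getD 0, -s.2))
    (0, 1)).1

-- ===== PRECONDITION & SPEC =====
-- A raises IndexError on i[0] for an empty row; those inputs are excluded.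
def Pre_solve (big_answers : List (List Int)) : Prop := ∀ row ∈ big_answers, row ≠ []
instance (big_answers : List (List Int)) : Decidable (Pre_solve big_answers) := by unfold Pre_solve; infer_instance
def pvWitness_solve : List (List Int) := [[1, 2], [3], [5]]

def Spec_solve (big_answers : List (List Int)) (out : Int) : Prop := out = solve_alt big_answers
instance (big_answers : List (List Int)) (out : Int) : Decidable (Spec_solve big_answers out) := by unfold Spec_solve; infer_instance

-- ===== CLAIM (what is proved, stated in full; the proofs are below) =====
def Claim_equal_solve : Prop := ∀ (big_answers : List (List Int)), Dom_solve big_answers → Pre_solve big_answers → Spec_solve big_answers (solve big_answers)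

-- ===== LEMMAS AND PROOFS =====

-- the telescoped alternating sum both ports compute
def altSum : List (List Int) → Int
  | [] => 0
  | x :: xs => (PySem.List.pyGet? x 0).getD 0 - altSum xs

theorem solve_eq_altSum (l : List (List Int)) :
    l.reverse.foldl solveStep (0, none, true) =
      if l = [] then (0, none, true) else (altSum l, some (altSum l), false) := by
  induction l with
  | nil => simp
  | cons x xs ih =>
    simp only [List.reverse_cons, List.foldl_append, ih, altSum]
    by_cases h : xs = [] <;> simp [h, solveStep, List.foldl, altSum]

theorem alt_eq_altSum (l : List (List Int)) (t s : Int) :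
    (l.foldl (fun (p : Int × Int) row =>
        (p.1 + p.2 * (PySem.List.pyGet? row 0).getD 0, -p.2)) (t, s)).1
      = t + s * altSum l := by
  induction l generalizing t s with
  | nil => simp [altSum]
  | cons x xs ih => simp [List.foldl, ih, altSum]; ring

-- ===== VERDICT (by name: the statement is the Claim_ definition above) =====
theorem solve_spec : Claim_equal_solve := by
  intro l _ _
  show solve l = solve_alt l
  unfold solve solve_alt
  rw [solve_eq_altSum, alt_eq_altSum]
  by_cases h : l = [] <;> simp [h, altSum]
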